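-- pv_equiv track=rewrite | github.com/Luciferai04/suicide_detection_paper | advanced_monitor.py | parse_bilstm_progress
-- ===== SOURCE A (Python) =====
-- from typing import Dict
--
-- def parse_bilstm_progress(log_content: str) -> Dict:
--     """Parse BiLSTM training progress from logs"""
--     if not log_content.strip():
--         return {'phase': 'starting', 'details': 'Initializing...'}
--
--     lines = log_content.split('\n')
--     info = {'phase': 'training', 'details': 'Processing...'}
--
--     for line in reversed(lines):
--         if 'epoch' in line.lower():
--             info['details'] = line.strip()
--             break
--         elif 'loss' in line.lower():
--             info['details'] = line.strip()
--             break
--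
--     return info
-- ===== SOURCE B (Python) =====
-- def parse_bilstm_progress(log_content: str):
--     """Parse BiLSTM training progress from logs (forward single pass, keep last match)."""
--     if not log_content.strip():
--         return {'phase': 'starting', 'details': 'Initializing...'}
--     details = 'Processing...'
--     for line in log_content.split('\n'):
--         low = line.lower()
--         if 'epoch' in low or 'loss' in low:
--             details = line.strip()
--     return {'phase': 'training', 'details': details}
-- ===== Notes on version B (the rewrite author's own statement) =====
-- stated objective: simpler
-- what changed: Replaces the reversed-iteration loop with early break and dict mutation by a single forward pass that keeps the last matching line in an accumulator and builds the dict once at the end.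
import Mathlib
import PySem

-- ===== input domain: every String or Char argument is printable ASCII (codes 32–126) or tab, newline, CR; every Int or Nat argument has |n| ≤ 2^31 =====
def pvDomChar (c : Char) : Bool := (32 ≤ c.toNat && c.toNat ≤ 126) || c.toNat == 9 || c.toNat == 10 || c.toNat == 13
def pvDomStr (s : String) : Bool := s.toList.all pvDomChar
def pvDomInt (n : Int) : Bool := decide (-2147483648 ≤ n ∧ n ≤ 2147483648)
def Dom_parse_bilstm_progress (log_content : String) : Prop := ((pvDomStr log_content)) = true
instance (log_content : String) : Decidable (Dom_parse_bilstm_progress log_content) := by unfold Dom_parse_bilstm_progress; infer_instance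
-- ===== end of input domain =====

-- B replaces A's reversed scan with early break and dict mutation by a single forward pass
-- keeping the last matching line; objective: simpler.

-- ===== PORT A =====
-- the 'for line in reversed(lines): … break' loop, recursion = iteration order (list already reversed by caller)
def pvA_loop (info : PySem.Dict String String) : List String → PySem.Dict String String
  | [] => info
  | line :: rest =>
    if PySem.Str.isIn "epoch" (PySem.Str.lower line) then info.insert "details" (PySem.Str.strip line)
    else if PySem.Str.isIn "loss" (PySem.Str.lower line) then info.insert "details" (PySem.Str.strip line)
    else pvA_loop info rest

def parse_bilstm_progress (log_content : String) : List (String × String) :=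
  if PySem.Str.strip log_content == "" then
    [("phase", "starting"), ("details", "Initializing...")]
  else
    let lines := (PySem.Str.split? log_content "\n").getD []
    let info : PySem.Dict String String := PySem.Dict.ofList [("phase", "training"), ("details", "Processing...")]
    (pvA_loop info lines.reverse).items

-- ===== PORT B =====
-- single forward pass, accumulator holds the last matching line's strip
def pvB_loop (details : String) : List String → String
  | [] => details
  | line :: rest =>
    let low := PySem.Str.lower line
    pvB_loop (if PySem.Str.isIn "epoch" low || PySem.Str.isIn "loss" low then PySem.Str.strip line else details) rest

def parse_bilstm_progress_alt (log_content : String) : List (String × String) :=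
  if PySem.Str.strip log_content == "" then
    [("phase", "starting"), ("details", "Initializing...")]
  else
    [("phase", "training"), ("details", pvB_loop "Processing..." ((PySem.Str.split? log_content "\n").getD []))]

-- ===== PRECONDITION & SPEC =====
def Spec_parse_bilstm_progress (log_content : String) (out : List (String × String)) : Prop := out = parse_bilstm_progress_alt log_content
instance (log_content : String) (out : List (String × String)) : Decidable (Spec_parse_bilstm_progress log_content out) := by unfold Spec_parse_bilstm_progress; infer_instance

-- ===== CLAIM (what is proved, stated in full; the proofs are below) =====
def Claim_equal_parse_bilstm_progress : Prop := ∀ (log_content : String), Dom_parse_bilstm_progress log_content → Spec_parse_bilstm_progress log_content (parse_bilstm_progress log_content)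

-- ===== LEMMAS AND PROOFS =====
def pvMatch (line : String) : Bool :=
  PySem.Str.isIn "epoch" (PySem.Str.lower line) || PySem.Str.isIn "loss" (PySem.Str.lower line)

theorem pvA_loop_eq_find (info : PySem.Dict String String) (l : List String) :
    pvA_loop info l = match l.find? pvMatch with
                      | some line => info.insert "details" (PySem.Str.strip line)
                      | none => info := by
  induction l with
  | nil => simp [pvA_loop]
  | cons x rest ih =>
    simp only [pvA_loop, List.find?_cons, pvMatch, ih]
    by_cases h1 : PySem.Str.isIn "epoch" (PySem.Str.lower x) = true
    · simp only [h1, Bool.true_or, if_true]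
    · simp only [Bool.not_eq_true] at h1
      by_cases h2 : PySem.Str.isIn "loss" (PySem.Str.lower x) = true
      · simp only [h1, h2, Bool.false_or, if_true, if_false, Bool.false_eq_true]
      · simp only [Bool.not_eq_true] at h2
        simp only [h1, h2, Bool.false_or, if_false, Bool.false_eq_true]

theorem pvB_loop_eq_find (d : String) (l : List String) :
    pvB_loop d l = match l.reverse.find? pvMatch with
                   | some line => PySem.Str.strip line
                   | none => d := by
  induction l generalizing d with
  | nil => simp [pvB_loop]
  | cons x rest ih =>
    simp only [pvB_loop, List.reverse_cons, List.find?_append, ih]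
    cases hf : rest.reverse.find? pvMatch with
    | some line => simp [hf]
    | none =>
      by_cases h : pvMatch x = true
      · simp [hf, pvMatch, List.find?] at *
        rcases h with h | h <;> simp [h]
      · simp [hf, List.find?, h]
        simp [pvMatch] at h
        simp [h.1, h.2]

theorem pv_items_insert (v : String) :
    ((PySem.Dict.ofList [("phase", "training"), ("details", "Processing...")] : PySem.Dict String String).insert "details" v).items
      = [("phase", "training"), ("details", v)] := by
  rfl

-- ===== VERDICT (by name: the statement is the Claim_ definition above) =====
theorem parse_bilstm_progress_spec : Claim_equal_parse_bilstm_progress := by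
  intro s _
  unfold Spec_parse_bilstm_progress parse_bilstm_progress parse_bilstm_progress_alt
  by_cases h : PySem.Str.strip s == ""
  · simp [h]
  · simp only [h, if_neg, Bool.false_eq_true, not_false_eq_true]
    rw [pvA_loop_eq_find, pvB_loop_eq_find]
    cases hf : ((PySem.Str.split? s "\n").getD []).reverse.find? pvMatch with
    | some line => simp [hf, pv_items_insert]
    | none => simp [hf]; rfl
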